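-- pv_equiv track=rewrite | github.com/AP-MI-2021/lab-2-ClaudiuDC21 | main.py | is_antipalindrome
-- ===== SOURCE A (Python) =====
-- def is_antipalindrome(n):
--     '''
--     Determina daca un numar dat n este antipalindrom
--     :param n: nr. intreg
--     :return: True daca n este antipalindrom si False in caz contrar
--     '''
--
--     n = abs(n)
--     nr_cifre = 0
--     copie_n = n
--
--     # Determinam numarul de cifre ale lui n
--     while copie_n != 0:
--         nr_cifre = nr_cifre + 1
--         copie_n = copie_n // 10
--     copie_n = n
--     invers = 0
--
--     # Aflam inversul lui n
--     while copie_n != 0: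
--         invers = invers * 10 + copie_n % 10
--         copie_n = copie_n // 10
--     i = nr_cifre // 2
--
--     # Comparam cifrele
--     while i != 0:
--         if n % 10 == invers % 10:
--             return False
--         i = i - 1
--         n = n // 10
--         invers = invers // 10
--     return True
-- ===== SOURCE B (Python) =====
-- def is_antipalindrome(n):
--     m = abs(n)
--     digits = []
--     while m > 0:
--         digits.append(m % 10)
--         m //= 10
--     L = len(digits)
--     return all(digits[i] != digits[L - 1 - i] for i in range(L // 2))
-- ===== Notes on version B (the rewrite author's own statement) =====
-- stated objective: simpler
-- what changed: B builds the little-endian digit list once in a single loop and does one half-length mirror comparison, replacing A's three arithmetic loops (digit count, reversed-number accumulator, stepwise modulo compare).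
import Mathlib
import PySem

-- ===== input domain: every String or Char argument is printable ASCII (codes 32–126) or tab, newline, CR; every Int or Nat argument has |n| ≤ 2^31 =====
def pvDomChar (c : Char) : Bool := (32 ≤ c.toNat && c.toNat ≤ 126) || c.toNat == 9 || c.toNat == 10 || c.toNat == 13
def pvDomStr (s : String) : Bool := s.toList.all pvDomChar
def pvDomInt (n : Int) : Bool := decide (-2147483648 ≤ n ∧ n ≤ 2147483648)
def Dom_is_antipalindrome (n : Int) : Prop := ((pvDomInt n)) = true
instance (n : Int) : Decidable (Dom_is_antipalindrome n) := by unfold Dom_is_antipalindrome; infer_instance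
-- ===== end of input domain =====

-- B replaces A's three arithmetic loops (digit count, reversed-number build, modulo compare)
-- with a single digit-list build plus one half-length mirror scan (objective: simpler).

-- ===== PORT A =====
-- A starts with n = abs(n), so every loop variable is nonnegative; the ports of A's
-- while-loops therefore run on Nat, where `/` and `%` agree exactly with Python's
-- floor division and modulo on nonnegative ints.

-- while copie_n != 0: nr_cifre += 1; copie_n //= 10
def pvACount (copie_n : Nat) (nr_cifre : Nat) : Nat :=
  if copie_n ≠ 0 then pvACount (copie_n / 10) (nr_cifre + 1) else nr_cifre
  decreasing_by exact Nat.div_lt_self (Nat.pos_of_ne_zero (by assumption)) (by norm_num)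

-- while copie_n != 0: invers = invers * 10 + copie_n % 10; copie_n //= 10
def pvARev (copie_n : Nat) (invers : Nat) : Nat :=
  if copie_n ≠ 0 then pvARev (copie_n / 10) (invers * 10 + copie_n % 10) else invers
  decreasing_by exact Nat.div_lt_self (Nat.pos_of_ne_zero (by assumption)) (by norm_num)

-- while i != 0: if n % 10 == invers % 10: return False; i -= 1; n //= 10; invers //= 10
def pvACmp (i : Nat) (m : Nat) (invers : Nat) : Bool :=
  match i with
  | 0 => true
  | i + 1 => if m % 10 == invers % 10 then false else pvACmp i (m / 10) (invers / 10)

def is_antipalindrome (n : Int) : Bool :=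
  let m := n.natAbs
  let nr_cifre := pvACount m 0
  let invers := pvARev m 0
  pvACmp (nr_cifre / 2) m invers

-- ===== PORT B =====
-- while m > 0: digits.append(m % 10); m //= 10
def pvBDigits (m : Nat) (digits : List Nat) : List Nat :=
  if m > 0 then pvBDigits (m / 10) (digits ++ [m % 10]) else digits
  decreasing_by exact Nat.div_lt_self (by assumption) (by norm_num)

def is_antipalindrome_alt (n : Int) : Bool :=
  let digits := pvBDigits n.natAbs []
  let L := digits.length
  -- all(digits[i] != digits[L-1-i] for i in range(L//2)); every index is in bounds,
  -- so List.getD is exact for Python's list indexing here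
  (List.range (L / 2)).all (fun i => digits.getD i 0 ≠ digits.getD (L - 1 - i) 0)

-- ===== PRECONDITION & SPEC =====
def Spec_is_antipalindrome (n : Int) (out : Bool) : Prop := out = is_antipalindrome_alt n
instance (n : Int) (out : Bool) : Decidable (Spec_is_antipalindrome n out) := by unfold Spec_is_antipalindrome; infer_instance

-- ===== CLAIM (what is proved, stated in full; the proofs are below) =====
def Claim_equal_is_antipalindrome : Prop := ∀ (n : Int), Dom_is_antipalindrome n → Spec_is_antipalindrome n (is_antipalindrome n)

-- ===== LEMMAS AND PROOFS =====

theorem pvACount_eq (m acc : Nat) : pvACount m acc = acc + (Nat.digits 10 m).length := by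
  induction m using Nat.strong_induction_on generalizing acc with
  | _ m ih =>
    rw [pvACount]
    by_cases h : m = 0
    · simp [h]
    · rw [if_pos h, ih (m / 10) (Nat.div_lt_self (Nat.pos_of_ne_zero h) (by norm_num)),
        Nat.digits_def' (by norm_num : 1 < 10) (Nat.pos_of_ne_zero h)]
      simp; omega

theorem pvARev_eq (m acc : Nat) :
    pvARev m acc = Nat.ofDigits 10 (Nat.digits 10 m).reverse + acc * 10 ^ (Nat.digits 10 m).length := by
  induction m using Nat.strong_induction_on generalizing acc with
  | _ m ih =>
    rw [pvARev]
    by_cases h : m = 0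
    · simp [h]
    · rw [if_pos h, ih (m / 10) (Nat.div_lt_self (Nat.pos_of_ne_zero h) (by norm_num)),
        Nat.digits_def' (by norm_num : 1 < 10) (Nat.pos_of_ne_zero h)]
      simp [Nat.ofDigits_append, Nat.ofDigits_cons]
      ring

theorem pvBDigits_eq (m : Nat) (acc : List Nat) :
    pvBDigits m acc = acc ++ Nat.digits 10 m := by
  induction m using Nat.strong_induction_on generalizing acc with
  | _ m ih =>
    rw [pvBDigits]
    by_cases h : m = 0
    · simp [h]
    · rw [if_pos (Nat.pos_of_ne_zero h), ih (m / 10) (Nat.div_lt_self (Nat.pos_of_ne_zero h) (by norm_num)),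
        Nat.digits_def' (by norm_num : 1 < 10) (Nat.pos_of_ne_zero h)]
      simp

-- digit extraction from a little-endian digit list whose entries are < 10
theorem ofDigits_div_pow_mod (l : List Nat) (hl : ∀ d ∈ l, d < 10) (k : Nat) :
    Nat.ofDigits 10 l / 10 ^ k % 10 = l.getD k 0 := by
  induction l generalizing k with
  | nil => simp [Nat.ofDigits]
  | cons d t ih =>
    have hd : d < 10 := hl d (List.mem_cons_self)
    have ht : ∀ x ∈ t, x < 10 := fun x hx => hl x (List.mem_cons_of_mem d hx)
    cases k with
    | zero =>
      simp only [Nat.ofDigits_cons, pow_zero, Nat.div_one, List.getD_cons_zero]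
      omega
    | succ k =>
      simp only [Nat.ofDigits_cons, List.getD_cons_succ]
      rw [pow_succ', ← Nat.div_div_eq_div_mul]
      have : (d + 10 * Nat.ofDigits 10 t) / 10 = Nat.ofDigits 10 t := by omega
      rw [this, ih ht k]

theorem pvACmp_eq (i : Nat) (m inv : Nat) :
    pvACmp i m inv =
      (List.range i).all (fun k => m / 10 ^ k % 10 ≠ inv / 10 ^ k % 10) := by
  induction i generalizing m inv with
  | zero => simp [pvACmp]
  | succ i ih =>
    rw [pvACmp, List.range_succ_eq_map, List.all_cons, List.all_map]
    by_cases h : m % 10 = inv % 10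
    · simp [h]
    · rw [if_neg (by simpa using h), ih (m / 10) (inv / 10)]
      have h0 : (decide ¬(m / 10 ^ 0 % 10 = inv / 10 ^ 0 % 10)) = true := by simpa using h
      rw [h0, Bool.true_and]
      apply List.all_congr rfl
      intro k
      have hm : m / 10 / 10 ^ k = m / 10 ^ (k + 1) := by
        rw [Nat.div_div_eq_div_mul, ← pow_succ']
      have hi : inv / 10 / 10 ^ k = inv / 10 ^ (k + 1) := by
        rw [Nat.div_div_eq_div_mul, ← pow_succ']
      simp [Function.comp, hm, hi]

-- ===== VERDICT (by name: the statement is the Claim_ definition above) =====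
theorem is_antipalindrome_spec : Claim_equal_is_antipalindrome := by
  intro n _
  unfold Spec_is_antipalindrome is_antipalindrome is_antipalindrome_alt
  simp only [pvACount_eq, pvARev_eq, pvBDigits_eq, pvACmp_eq, Nat.zero_add,
    List.nil_append, Nat.zero_mul, Nat.add_zero]
  generalize n.natAbs = m
  have hlt : ∀ d ∈ Nat.digits 10 m, d < 10 := fun d hd => Nat.digits_lt_base (by norm_num) hd
  have hrl : ∀ d ∈ (Nat.digits 10 m).reverse, d < 10 := fun d hd => hlt d (List.mem_reverse.mp hd)
  have h1 : ∀ k, m / 10 ^ k % 10 = (Nat.digits 10 m).getD k 0 := by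
    intro k
    conv_lhs => rw [← Nat.ofDigits_digits 10 m]
    exact ofDigits_div_pow_mod _ hlt k
  have h2 : ∀ k, k < (Nat.digits 10 m).length →
      Nat.ofDigits 10 (Nat.digits 10 m).reverse / 10 ^ k % 10
        = (Nat.digits 10 m).getD ((Nat.digits 10 m).length - 1 - k) 0 := by
    intro k hkL
    rw [ofDigits_div_pow_mod _ hrl k]
    have hk' : k < (Nat.digits 10 m).reverse.length := by simpa using hkL
    rw [List.getD_eq_getElem _ _ hk', List.getElem_reverse,
      List.getD_eq_getElem _ _
        (by simpa using (by omega : (Nat.digits 10 m).length - 1 - k < (Nat.digits 10 m).length))]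
  rw [Bool.eq_iff_iff]
  simp only [List.all_eq_true, List.mem_range, decide_eq_true_eq]
  apply forall_congr'
  intro k
  apply imp_congr_right
  intro hk
  rw [h1 k, h2 k (by omega)]
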